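-- pv_equiv track=rewrite | github.com/sachinshelke/ToolsConnector | webapp/app.py | _best_first_action
-- ===== SOURCE A (Python) =====
-- def _best_first_action(actions: dict) -> str:
--     """Pick the most useful action for quickstart examples."""
--     # Prefer specific common actions first
--     preferred = [
--         "list_emails", "list_messages", "list_files", "list_events",
--         "list_repos", "list_channels", "list_contacts", "list_issues",
--         "list_records", "list_tasks", "list_products", "list_projects",
--         "get_values", "get_spreadsheet", "get_document",
--         "search", "query",
--     ]
--     for name in preferred:
--         if name in actions:
--             return name
--     # Fall back to first list_ or get_ action
--     for aname in sorted(actions.keys()):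
--         if aname.startswith("list_") or aname.startswith("get_"):
--             return aname
--     return sorted(actions.keys())[0] if actions else "action"
-- ===== SOURCE B (Python) =====
-- def _best_first_action(actions: dict) -> str:
--     """Pick the most useful action for quickstart examples."""
--     preferred = [
--         "list_emails", "list_messages", "list_files", "list_events",
--         "list_repos", "list_channels", "list_contacts", "list_issues",
--         "list_records", "list_tasks", "list_products", "list_projects",
--         "get_values", "get_spreadsheet", "get_document",
--         "search", "query",
--     ]
--     # Single pass: track the best (tier, preferred-index, name) key seen so far.
--     best = None
--     for name in actions:
--         if name in preferred:
--             k = (0, preferred.index(name), name)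
--         elif name.startswith("list_") or name.startswith("get_"):
--             k = (1, 0, name)
--         else:
--             k = (2, 0, name)
--         if best is None or k < best:
--             best = k
--     return "action" if best is None else best[2]
-- ===== Notes on version B (the rewrite author's own statement) =====
-- stated objective: faster
-- what changed: A's three staged scans (walk the preferred list, then sort all keys and scan for a list_/get_ prefix, then take the sorted head) are replaced by a single unsorted pass over the dict that keeps the minimum of a composite (tier, preferred-index, name) key, eliminating the sort.
import Mathlib
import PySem

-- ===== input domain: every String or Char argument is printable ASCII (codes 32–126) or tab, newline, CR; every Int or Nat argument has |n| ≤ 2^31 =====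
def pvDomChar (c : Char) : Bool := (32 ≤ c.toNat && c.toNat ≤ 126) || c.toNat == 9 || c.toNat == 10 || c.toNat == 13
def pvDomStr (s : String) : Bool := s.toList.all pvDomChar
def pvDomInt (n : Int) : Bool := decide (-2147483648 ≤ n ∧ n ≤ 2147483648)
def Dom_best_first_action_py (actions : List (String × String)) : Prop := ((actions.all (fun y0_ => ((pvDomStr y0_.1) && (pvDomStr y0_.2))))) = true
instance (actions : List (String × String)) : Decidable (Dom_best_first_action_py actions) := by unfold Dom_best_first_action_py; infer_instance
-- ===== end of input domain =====

-- B replaces A's staged scans (preferred list, then a sort + prefix scan, then sorted head)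
-- by one unsorted pass keeping the minimum of a composite (tier, preferred-index, name) key; measured faster.

-- ===== PORT A =====
def pvPreferred : List String :=
  ["list_emails", "list_messages", "list_files", "list_events",
   "list_repos", "list_channels", "list_contacts", "list_issues",
   "list_records", "list_tasks", "list_products", "list_projects",
   "get_values", "get_spreadsheet", "get_document",
   "search", "query"]

def best_first_action_py (actions : List (String × String)) : String :=
  let keys := actions.map Prod.fst
  match pvPreferred.find? (fun name => keys.contains name) with
  | some name => name
  | none =>
    match (PySem.List.sorted keys (fun x => x) false).find?
        (fun aname => PySem.Str.startswith aname "list_" || PySem.Str.startswith aname "get_") with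
    | some aname => aname
    | none =>
      if actions.isEmpty then "action"
      else (PySem.List.sorted keys (fun x => x) false).headD "action"

-- ===== PORT B =====
def pvPreferredAlt : List String :=
  ["list_emails", "list_messages", "list_files", "list_events",
   "list_repos", "list_channels", "list_contacts", "list_issues",
   "list_records", "list_tasks", "list_products", "list_projects",
   "get_values", "get_spreadsheet", "get_document",
   "search", "query"]

-- the composite key k computed for one name ( preferred.index is guarded by the membership test )
def pvRank (name : String) : Nat × Nat × String :=
  if pvPreferredAlt.contains name then
    (0, (PySem.List.index? pvPreferredAlt name).getD 0, name)
  else if PySem.Str.startswith name "list_" || PySem.Str.startswith name "get_" then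
    (1, 0, name)
  else
    (2, 0, name)

-- Python's lexicographic '<' on the 3-tuples
def pvRankLt (a b : Nat × Nat × String) : Bool :=
  decide (a.1 < b.1 ∨ (a.1 = b.1 ∧ (a.2.1 < b.2.1 ∨ (a.2.1 = b.2.1 ∧ a.2.2 < b.2.2))))

def best_first_action_py_alt (actions : List (String × String)) : String :=
  match actions.foldl (fun best kv =>
      match best with
      | none => some (pvRank kv.1)
      | some b => if pvRankLt (pvRank kv.1) b then some (pvRank kv.1) else some b) none with
  | none => "action"
  | some b => b.2.2

-- ===== PRECONDITION & SPEC =====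
def Spec_best_first_action_py (actions : List (String × String)) (out : String) : Prop := out = best_first_action_py_alt actions
instance (actions : List (String × String)) (out : String) : Decidable (Spec_best_first_action_py actions out) := by unfold Spec_best_first_action_py; infer_instance

-- ===== CLAIM (what is proved, stated in full; the proofs are below) =====
def Claim_equal_best_first_action_py : Prop := ∀ (actions : List (String × String)), Dom_best_first_action_py actions → Spec_best_first_action_py actions (best_first_action_py actions)

-- ===== LEMMAS AND PROOFS =====

-- "name is a minimum-rank key": what both programs compute for a nonempty input
def pvIsBest (keys : List String) (name : String) : Prop :=
  name ∈ keys ∧ ∀ q ∈ keys, pvRankLt (pvRank q) (pvRank name) = false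

theorem pvRank_name (name : String) : (pvRank name).2.2 = name := by
  unfold pvRank; split_ifs <;> rfl

theorem pvRankLt_antisymm {a b : Nat × Nat × String}
    (h1 : pvRankLt a b = false) (h2 : pvRankLt b a = false) : a = b := by
  unfold pvRankLt at h1 h2
  simp only [decide_eq_false_iff_not, not_or, not_and, not_lt] at h1 h2
  obtain ⟨a1, a2, a3⟩ := a
  obtain ⟨b1, b2, b3⟩ := b
  simp only at *
  have e1 : a1 = b1 := le_antisymm h2.1 h1.1
  subst e1
  have h1' := h1.2 rfl
  have h2' := h2.2 rfl
  have e2 : a2 = b2 := le_antisymm h2'.1 h1'.1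
  subst e2
  have e3 : a3 = b3 := le_antisymm (h2'.2 rfl) (h1'.2 rfl)
  subst e3; rfl

theorem pvRankLt_trans {a b c : Nat × Nat × String}
    (h1 : pvRankLt a b = true) (h2 : pvRankLt b c = true) : pvRankLt a c = true := by
  unfold pvRankLt at *
  simp only [decide_eq_true_eq] at *
  obtain ⟨a1, a2, a3⟩ := a; obtain ⟨b1, b2, b3⟩ := b; obtain ⟨c1, c2, c3⟩ := c
  simp only at *
  rcases h1 with h1 | ⟨e1, h1⟩ <;> rcases h2 with h2 | ⟨e2, h2⟩
  · exact Or.inl (lt_trans h1 h2)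
  · exact Or.inl (e2 ▸ h1)
  · exact Or.inl (e1 ▸ h2)
  · refine Or.inr ⟨e1.trans e2, ?_⟩
    rcases h1 with h1 | ⟨f1, h1⟩ <;> rcases h2 with h2 | ⟨f2, h2⟩
    · exact Or.inl (lt_trans h1 h2)
    · exact Or.inl (f2 ▸ h1)
    · exact Or.inl (f1 ▸ h2)
    · exact Or.inr ⟨f1.trans f2, lt_trans h1 h2⟩

-- uniqueness of the minimum-rank key
theorem pvIsBest_unique {keys : List String} {a b : String}
    (ha : pvIsBest keys a) (hb : pvIsBest keys b) : a = b := by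
  have h1 := hb.2 a ha.1
  have h2 := ha.2 b hb.1
  have := pvRankLt_antisymm h1 h2
  have := congrArg (·.2.2) this
  simpa [pvRank_name] using this

-- ---- A-side helper lemmas ----

-- find? picks the element of least index among those satisfying the predicate
theorem pvFind?_index_min (l : List String) (pred : String → Bool) (p q : String)
    (hf : l.find? pred = some p) (hq : q ∈ l) (hpq : pred q = true) :
    ∃ ip iq, PySem.List.index? l p = some ip ∧ PySem.List.index? l q = some iq ∧
      ip ≤ iq ∧ (ip = iq → p = q) := by
  induction l with
  | nil => cases hq
  | cons x t ih =>
    by_cases hx : pred x = true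
    · have hp : p = x := by
        simp [hx] at hf; exact hf.symm
      subst hp
      refine ⟨0, ?_⟩
      by_cases hqx : q = p
      · subst hqx
        exact ⟨0, PySem.List.index?_cons_self _ _, PySem.List.index?_cons_self _ _, le_refl _, fun _ => rfl⟩
      · have hq' : q ∈ t := by
          rcases List.mem_cons.mp hq with h | h
          · exact absurd h hqx
          · exact h
        obtain ⟨j, hj⟩ : ∃ j, PySem.List.index? t q = some j := by
          have := (PySem.List.index?_isSome_iff t q).mpr hq'
          exact Option.isSome_iff_exists.mp this
        refine ⟨j + 1, PySem.List.index?_cons_self _ _, ?_, Nat.zero_le _, fun h => absurd h.symm (Nat.succ_ne_zero j)⟩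
        rw [PySem.List.index?_cons_of_ne t (fun h => hqx (h.symm)), hj]; rfl
    · have hf' : t.find? pred = some p := by
        simpa [List.find?_cons, hx] using hf
      have hppred : pred p = true := List.find?_some hf'
      have hpx : x ≠ p := fun h => hx (h ▸ hppred)
      have hqx : x ≠ q := fun h => hx (h ▸ hpq)
      have hq' : q ∈ t := by
        rcases List.mem_cons.mp hq with h | h
        · exact absurd h.symm hqx
        · exact h
      obtain ⟨ip, iq, h1, h2, h3, h4⟩ := ih hf' hq'
      refine ⟨ip + 1, iq + 1, ?_, ?_, Nat.add_le_add_right h3 1, fun h => h4 (Nat.add_right_cancel h)⟩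
      · rw [PySem.List.index?_cons_of_ne t hpx, h1]; rfl
      · rw [PySem.List.index?_cons_of_ne t hqx, h2]; rfl

-- on a ≤-sorted list, the first element satisfying pred is ≤ every element satisfying pred
theorem pvFind?_min_of_pairwise {l : List String} {pred : String → Bool} {m : String}
    (hl : l.Pairwise (· ≤ ·)) (h : l.find? pred = some m) :
    ∀ y ∈ l, pred y = true → m ≤ y := by
  induction l with
  | nil => cases h
  | cons x t ih =>
    rcases List.pairwise_cons.mp hl with ⟨hx, ht⟩
    by_cases hpx : pred x = true
    · have hm : m = x := by simp [hpx] at h; exact h.symm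
      subst hm
      intro y hy _
      rcases List.mem_cons.mp hy with h | h
      · exact le_of_eq h.symm
      · exact hx y h
    · have h' : t.find? pred = some m := by simpa [List.find?_cons, hpx] using h
      intro y hy hpy
      rcases List.mem_cons.mp hy with hh | hh
      · exact absurd (hh ▸ hpy) hpx
      · exact ih ht h' y hh hpy

theorem pvPreferredAlt_eq : pvPreferredAlt = pvPreferred := rfl

theorem pvRank_not_preferred {q : String} (h : pvPreferred.contains q = false) :
    (pvRank q).1 = 1 ∨ (pvRank q).1 = 2 := by
  unfold pvRank
  rw [pvPreferredAlt_eq, h]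
  simp only [Bool.false_eq_true, if_false]
  split_ifs <;> simp

-- a key of tier ≥ 1 is never lex-below a tier-0 key
theorem pvRankLt_tier_false {q p : String}
    (hq : (pvRank q).1 = 1 ∨ (pvRank q).1 = 2) (hp : (pvRank p).1 = 0) :
    pvRankLt (pvRank q) (pvRank p) = false := by
  unfold pvRankLt
  rcases hq with h | h <;> rw [h, hp] <;> simp

-- ---- A computes a minimum-rank key on nonempty inputs ----
theorem pvA_isBest (actions : List (String × String)) (hne : actions ≠ []) :
    pvIsBest (actions.map Prod.fst) (best_first_action_py actions) := by
  have hkne : actions.map Prod.fst ≠ [] := by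
    simpa [List.map_eq_nil_iff] using hne
  have hie : actions.isEmpty = false := by
    simpa [List.isEmpty_iff] using hne
  rcases hf : pvPreferred.find? (fun name => (actions.map Prod.fst).contains name) with _ | p
  · -- no preferred key present
    have hnopref : ∀ n ∈ pvPreferred, (actions.map Prod.fst).contains n = false := by
      intro n hn
      have := List.find?_eq_none.mp hf n hn
      simpa using this
    have hqnp : ∀ q ∈ actions.map Prod.fst, pvPreferred.contains q = false := by
      intro q hq
      by_contra hc
      have hqp : q ∈ pvPreferred := by
        simpa [List.contains_iff_mem] using (Bool.not_eq_false _).mp hc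
      have h2 : q ∉ actions.map Prod.fst := by
        simpa using hnopref q hqp
      exact h2 hq
    have hpair : (PySem.List.sorted (actions.map Prod.fst) (fun x => x) false).Pairwise (· ≤ ·) := by
      have := PySem.List.sorted_pairwise (actions.map Prod.fst) (fun x => x)
      simpa using this
    rcases hg : (PySem.List.sorted (actions.map Prod.fst) (fun x => x) false).find?
        (fun aname => PySem.Str.startswith aname "list_" || PySem.Str.startswith aname "get_") with _ | m
    · -- tier 2 only: head of the sorted key list
      have hsne : PySem.List.sorted (actions.map Prod.fst) (fun x => x) false ≠ [] := by
        rw [Ne, PySem.List.sorted_eq_nil_iff]; exact hkne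
      rcases hs : PySem.List.sorted (actions.map Prod.fst) (fun x => x) false with _ | ⟨m, t⟩
      · exact absurd hs hsne
      have hmk : m ∈ actions.map Prod.fst := by
        have hm : m ∈ PySem.List.sorted (actions.map Prod.fst) (fun x => x) false := by
          rw [hs]; exact List.mem_cons_self
        exact (PySem.List.mem_sorted (actions.map Prod.fst) (fun x => x) false m).mp hm
      have hmle : ∀ y ∈ actions.map Prod.fst, m ≤ y := by
        intro y hy
        have := PySem.List.key_head_sorted_le (xs := actions.map Prod.fst) (key := fun x => x) hs y hy
        simpa using this
      have hnopfx : ∀ y ∈ actions.map Prod.fst,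
          (PySem.Str.startswith y "list_" || PySem.Str.startswith y "get_") = false := by
        intro y hy
        have hy' : y ∈ PySem.List.sorted (actions.map Prod.fst) (fun x => x) false :=
          (PySem.List.mem_sorted (actions.map Prod.fst) (fun x => x) false y).mpr hy
        have := List.find?_eq_none.mp hg y hy'
        simpa using this
      have hrank : ∀ y, y ∈ actions.map Prod.fst → pvRank y = (2, 0, y) := by
        intro y hy
        unfold pvRank
        rw [pvPreferredAlt_eq, hqnp y hy, hnopfx y hy]
        simp
      simp only [best_first_action_py, hf, hg, hie, Bool.false_eq_true, if_false]
      rw [hs]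
      simp only [List.headD_cons]
      refine ⟨hmk, ?_⟩
      intro q hq
      rw [hrank q hq, hrank m hmk]
      unfold pvRankLt
      simp only [decide_eq_false_iff_not, not_or, not_and, not_lt]
      exact ⟨le_refl _, fun _ => ⟨le_refl _, fun _ => hmle q hq⟩⟩
    · -- tier 1: first prefix match in sorted order
      have hmem : m ∈ PySem.List.sorted (actions.map Prod.fst) (fun x => x) false :=
        List.mem_of_find?_eq_some hg
      have hmk : m ∈ actions.map Prod.fst :=
        (PySem.List.mem_sorted (actions.map Prod.fst) (fun x => x) false m).mp hmem
      have hmp : (PySem.Str.startswith m "list_" || PySem.Str.startswith m "get_") = true := by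
        have := List.find?_some hg
        simpa using this
      have hrm : pvRank m = (1, 0, m) := by
        unfold pvRank; rw [pvPreferredAlt_eq, hqnp m hmk, hmp]; simp
      simp only [best_first_action_py, hf, hg]
      refine ⟨hmk, ?_⟩
      intro q hq
      by_cases hqp : (PySem.Str.startswith q "list_" || PySem.Str.startswith q "get_") = true
      · have hrq : pvRank q = (1, 0, q) := by
          unfold pvRank; rw [pvPreferredAlt_eq, hqnp q hq, hqp]; simp
        have hmq : m ≤ q := by
          have hq' : q ∈ PySem.List.sorted (actions.map Prod.fst) (fun x => x) false :=
            (PySem.List.mem_sorted (actions.map Prod.fst) (fun x => x) false q).mpr hq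
          exact pvFind?_min_of_pairwise hpair hg q hq' hqp
        rw [hrq, hrm]
        unfold pvRankLt
        simp only [decide_eq_false_iff_not, not_or, not_and, not_lt]
        exact ⟨le_refl _, fun _ => ⟨le_refl _, fun _ => hmq⟩⟩
      · have hqp' : (PySem.Str.startswith q "list_" || PySem.Str.startswith q "get_") = false := by
          simpa using hqp
        have hrq : pvRank q = (2, 0, q) := by
          unfold pvRank
          rw [pvPreferredAlt_eq, hqnp q hq, hqp']
          simp
        rw [hrq, hrm]
        unfold pvRankLt; simp
  · -- a preferred key is present: p is the earliest in pvPreferred that occurs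
    have hpmem : p ∈ pvPreferred := List.mem_of_find?_eq_some hf
    have hpk : p ∈ actions.map Prod.fst := by
      have := List.find?_some hf
      simpa [List.contains_iff_mem] using this
    have hpc : pvPreferred.contains p = true := by
      simpa [List.contains_iff_mem] using hpmem
    have hrp1 : (pvRank p).1 = 0 := by
      unfold pvRank
      rw [pvPreferredAlt_eq, hpc]
      rfl
    simp only [best_first_action_py, hf]
    refine ⟨hpk, ?_⟩
    intro q hq
    by_cases hqpref : q ∈ pvPreferred
    · -- both preferred: compare indices in the preferred list
      have hqc : (actions.map Prod.fst).contains q = true := by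
        simpa [List.contains_iff_mem] using hq
      obtain ⟨ip, iq, h1, h2, h3, h4⟩ :=
        pvFind?_index_min pvPreferred (fun name => (actions.map Prod.fst).contains name) p q hf hqpref hqc
      have hrp : pvRank p = (0, ip, p) := by
        unfold pvRank
        rw [pvPreferredAlt_eq, hpc, h1]
        rfl
      have hrq : pvRank q = (0, iq, q) := by
        unfold pvRank
        have hc : pvPreferred.contains q = true := by simpa [List.contains_iff_mem] using hqpref
        rw [pvPreferredAlt_eq, hc, h2]
        rfl
      rw [hrp, hrq]
      unfold pvRankLt
      simp only [decide_eq_false_iff_not, not_or, not_and, not_lt]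
      refine ⟨le_refl _, fun _ => ⟨h3, fun he => ?_⟩⟩
      exact le_of_eq (h4 he.symm)
    · have hqc : pvPreferred.contains q = false := by
        simpa [List.contains_iff_mem] using hqpref
      exact pvRankLt_tier_false (pvRank_not_preferred hqc) hrp1

-- ---- B computes a minimum-rank key on nonempty inputs ----

--运 the inner fold once the accumulator is `some`
theorem pvFold_some (l : List (String × String)) (b0 : Nat × Nat × String) :
    l.foldl (fun best kv =>
      match best with
      | none => some (pvRank kv.1)
      | some b => if pvRankLt (pvRank kv.1) b then some (pvRank kv.1) else some b) (some b0)
    = some (l.foldl (fun b kv => if pvRankLt (pvRank kv.1) b then pvRank kv.1 else b) b0) := by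
  induction l generalizing b0 with
  | nil => rfl
  | cons kv t ih =>
    by_cases h : pvRankLt (pvRank kv.1) b0 = true
    · simp only [List.foldl_cons, h, if_true, ih]
    · simp only [Bool.not_eq_true] at h
      simp only [List.foldl_cons, h, Bool.false_eq_true, if_false, ih]

theorem pvRankLt_irrefl (a : Nat × Nat × String) : pvRankLt a a = false := by
  unfold pvRankLt
  simp

theorem pvRankLt_total {a b : Nat × Nat × String}
    (h : pvRankLt a b = false) : pvRankLt b a = true ∨ a = b := by
  rcases hb : pvRankLt b a with _ | _
  · exact Or.inr (pvRankLt_antisymm h hb)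
  · exact Or.inl rfl

theorem pvPlainFold_min (l : List (String × String)) (b0 : Nat × Nat × String) :
    (l.foldl (fun b kv => if pvRankLt (pvRank kv.1) b then pvRank kv.1 else b) b0 = b0 ∨
     ∃ kv ∈ l, l.foldl (fun b kv => if pvRankLt (pvRank kv.1) b then pvRank kv.1 else b) b0 = pvRank kv.1) ∧
    pvRankLt b0 (l.foldl (fun b kv => if pvRankLt (pvRank kv.1) b then pvRank kv.1 else b) b0) = false ∧
    ∀ kv ∈ l, pvRankLt (pvRank kv.1)
      (l.foldl (fun b kv => if pvRankLt (pvRank kv.1) b then pvRank kv.1 else b) b0) = false := by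
  induction l generalizing b0 with
  | nil =>
    exact ⟨Or.inl rfl, pvRankLt_irrefl b0, by intro kv h; cases h⟩
  | cons x t ih =>
    by_cases h : pvRankLt (pvRank x.1) b0 = true
    · simp only [List.foldl_cons, h, if_true]
      obtain ⟨hsrc, hle1, hall⟩ := ih (pvRank x.1)
      refine ⟨?_, ?_, ?_⟩
      · rcases hsrc with he | ⟨kv, hkv, he⟩
        · exact Or.inr ⟨x, List.mem_cons_self, he⟩
        · exact Or.inr ⟨kv, List.mem_cons_of_mem _ hkv, he⟩
      · by_cases hb : pvRankLt b0
            (t.foldl (fun b kv => if pvRankLt (pvRank kv.1) b then pvRank kv.1 else b) (pvRank x.1)) = true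
        · have := pvRankLt_trans h hb
          rw [hle1] at this
          exact absurd this (by simp)
        · simpa using hb
      · intro kv hkv
        rcases List.mem_cons.mp hkv with hh | hh
        · rw [hh]; exact hle1
        · exact hall kv hh
    · have h' : pvRankLt (pvRank x.1) b0 = false := by simpa using h
      simp only [List.foldl_cons, h', Bool.false_eq_true, if_false]
      obtain ⟨hsrc, hle1, hall⟩ := ih b0
      refine ⟨?_, hle1, ?_⟩
      · rcases hsrc with he | ⟨kv, hkv, he⟩
        · exact Or.inl he
        · exact Or.inr ⟨kv, List.mem_cons_of_mem _ hkv, he⟩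
      · intro kv hkv
        rcases List.mem_cons.mp hkv with hh | hh
        · rw [hh]
          by_cases hc : pvRankLt (pvRank x.1)
              (t.foldl (fun b kv => if pvRankLt (pvRank kv.1) b then pvRank kv.1 else b) b0) = true
          · rcases pvRankLt_total h' with hba | hba
            · have := pvRankLt_trans hba hc
              rw [hle1] at this
              exact absurd this (by simp)
            · rw [hba] at hc
              rw [hle1] at hc
              exact absurd hc (by simp)
          · simpa using hc
        · exact hall kv hh

theorem pvB_isBest (actions : List (String × String)) (hne : actions ≠ []) :
    pvIsBest (actions.map Prod.fst) (best_first_action_py_alt actions) := by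
  rcases actions with _ | ⟨kv0, rest⟩
  · exact absurd rfl hne
  unfold best_first_action_py_alt
  simp only [List.foldl_cons]
  rw [pvFold_some rest (pvRank kv0.1)]
  obtain ⟨hsrc, hle0, hall⟩ := pvPlainFold_min rest (pvRank kv0.1)
  set r := rest.foldl (fun b kv => if pvRankLt (pvRank kv.1) b then pvRank kv.1 else b) (pvRank kv0.1) with hr
  have hmem : r.2.2 ∈ (kv0 :: rest).map Prod.fst := by
    rcases hsrc with he | ⟨kv, hkv, he⟩
    · rw [he, pvRank_name]
      exact List.mem_cons_self
    · rw [he, pvRank_name]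
      exact List.mem_cons_of_mem _ (List.mem_map_of_mem hkv)
  have hrrank : pvRank r.2.2 = r := by
    rcases hsrc with he | ⟨kv, hkv, he⟩ <;> rw [he, pvRank_name]
  refine ⟨hmem, ?_⟩
  intro q hq
  rw [hrrank]
  rcases List.mem_map.mp hq with ⟨kv, hkv, hkvq⟩
  rcases List.mem_cons.mp hkv with h | h
  · rw [← hkvq, h]
    exact hle0
  · rw [← hkvq]
    exact hall kv h

-- ===== VERDICT (by name: the statement is the Claim_ definition above) =====
theorem best_first_action_py_spec : Claim_equal_best_first_action_py := by
  intro actions _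
  unfold Spec_best_first_action_py
  rcases h : actions with _ | ⟨kv, rest⟩
  · rfl
  · exact (pvIsBest_unique (pvA_isBest (kv :: rest) (by simp)) (pvB_isBest (kv :: rest) (by simp)))
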